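-- pv_equiv track=rewrite | github.com/yunyiian/Experimental-DNA | recursor.py | validate_domain
-- ===== SOURCE A (Python) =====
-- def validate_domain(domain: str) -> bool:
--     allowed_chars = set("abcdefghijklmnopqrstuvwxyzABCDEFGHIJKLMNOPQRSTUVWXYZ0123456789-.")
--     return (
--         all(char in allowed_chars for char in domain) and
--         not domain.startswith(".") and
--         not domain.endswith(".") and
--         not domain.startswith("-") and
--         not domain.endswith("-") and
--         ".." not in domain and
--         domain.count(".") >= 2
--     )
-- ===== SOURCE B (Python) =====
-- ALLOWED = "abcdefghijklmnopqrstuvwxyzABCDEFGHIJKLMNOPQRSTUVWXYZ0123456789-."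
--
-- def validate_domain(domain: str) -> bool:
--     # single left-to-right scan with early exit, instead of A's several passes
--     if not domain or domain[0] in ".-" or domain[-1] in ".-":
--         return False
--     dots = 0
--     prev_dot = False
--     for ch in domain:
--         if ch not in ALLOWED:
--             return False
--         if ch == ".":
--             if prev_dot:
--                 return False
--             dots += 1
--             prev_dot = True
--         else:
--             prev_dot = False
--     return dots >= 2
-- ===== Notes on version B (the rewrite author's own statement) =====
-- stated objective: alternative
-- what changed: Replaced A's six separate whole-string passes (char-set scan, startswith/endswith x4, '..' substring search, '.' count) with a single left-to-right scan that tracks a previous-char-was-dot flag and a dot counter, with early exit, after one boundary check on the first and last character.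
import Mathlib
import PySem

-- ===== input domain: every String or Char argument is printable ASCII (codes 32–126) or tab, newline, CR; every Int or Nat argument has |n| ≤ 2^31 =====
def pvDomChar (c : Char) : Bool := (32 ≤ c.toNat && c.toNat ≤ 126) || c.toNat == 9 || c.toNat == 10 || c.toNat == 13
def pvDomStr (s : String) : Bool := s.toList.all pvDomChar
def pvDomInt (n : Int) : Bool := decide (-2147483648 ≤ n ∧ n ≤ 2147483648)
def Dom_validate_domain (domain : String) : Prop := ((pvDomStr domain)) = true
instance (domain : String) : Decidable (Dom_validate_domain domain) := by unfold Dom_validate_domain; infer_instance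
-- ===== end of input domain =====

-- ===== PORT A =====
-- B replaces A's several whole-string passes by one left-to-right scan; return values proved equal.
def pvAllowedChars : List Char :=
  "abcdefghijklmnopqrstuvwxyzABCDEFGHIJKLMNOPQRSTUVWXYZ0123456789-.".toList

def validate_domain (domain : String) : Bool :=
  let allowed_chars := PySem.Set.ofList pvAllowedChars
  (domain.toList.all (fun c => PySem.Set.contains allowed_chars c)) &&
  !(PySem.Str.startswith domain ".") &&
  !(PySem.Str.endswith domain ".") &&
  !(PySem.Str.startswith domain "-") &&
  !(PySem.Str.endswith domain "-") &&
  !(PySem.Str.isIn ".." domain) &&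
  decide (2 ≤ PySem.Str.count domain ".")

-- ===== PORT B =====
-- the for-loop of Source B: state = (prev_dot, dots), early returns become `false` results
def validate_domain_alt_go : List Char → Bool → Nat → Bool
  | [], _, dots => decide (2 ≤ dots)
  | c :: rest, prevDot, dots =>
    if !(pvAllowedChars.contains c) then false
    else if c == '.' then
      if prevDot then false else validate_domain_alt_go rest true (dots + 1)
    else validate_domain_alt_go rest false dots

def validate_domain_alt (domain : String) : Bool :=
  match domain.toList with
  | [] => false
  | c :: rest =>
    let last := rest.getLastD c
    if c == '.' || c == '-' || last == '.' || last == '-' then false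
    else validate_domain_alt_go (c :: rest) false 0

-- ===== PRECONDITION & SPEC =====
def Spec_validate_domain (domain : String) (out : Bool) : Prop := out = validate_domain_alt domain
instance (domain : String) (out : Bool) : Decidable (Spec_validate_domain domain out) := by unfold Spec_validate_domain; infer_instance

-- ===== CLAIM (what is proved, stated in full; the proofs are below) =====
def Claim_equal_validate_domain : Prop := ∀ (domain : String), Dom_validate_domain domain → Spec_validate_domain domain (validate_domain domain)

-- ===== LEMMAS AND PROOFS =====

-- "no adjacent dots" as a Bool predicate, and "head is a dot"
def pvHeadDot : List Char → Bool
  | [] => false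
  | c :: _ => c == '.'

def pvNoDD : List Char → Bool
  | [] => true
  | [_] => true
  | a :: b :: t => !(a == '.' && b == '.') && pvNoDD (b :: t)

theorem pvNoDD_cons (c : Char) (t : List Char) :
    pvNoDD (c :: t) = (!(c == '.' && pvHeadDot t) && pvNoDD t) := by
  cases t <;> simp [pvNoDD, pvHeadDot]

-- Python's s.count(".") over chars is List.count '.'
theorem count_go_single (c : Char) (s : List Char) (fuel acc : Nat) (h : s.length ≤ fuel) :
    PySem.Chars.count.go [c] fuel s acc = acc + s.count c := by
  induction fuel generalizing s acc with
  | zero =>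
    have : s = [] := by cases s <;> simp_all
    subst this; simp [PySem.Chars.count.go]
  | succ n ih =>
    cases s with
    | nil => simp [PySem.Chars.count.go]
    | cons x t =>
      rw [List.length_cons] at h
      by_cases hx : c = x
      · subst hx
        show (if ([c].isPrefixOf (c :: t)) = true then
               PySem.Chars.count.go [c] n (List.drop [c].length (c :: t)) (acc + 1)
             else PySem.Chars.count.go [c] n t acc) = acc + (c :: t).count c
        rw [if_pos (by simp [List.isPrefixOf])]
        simp only [List.length_singleton, List.drop_one, List.tail_cons]
        rw [ih t (acc + 1) (by omega)]
        simp
        omega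
      · show (if ([c].isPrefixOf (x :: t)) = true then
               PySem.Chars.count.go [c] n (List.drop [c].length (x :: t)) (acc + 1)
             else PySem.Chars.count.go [c] n t acc) = acc + (x :: t).count c
        rw [if_neg (by simp [List.isPrefixOf, hx])]
        rw [ih t acc (by omega)]
        simp [List.count_cons, Ne.symm hx]

theorem count_single (c : Char) (s : List Char) :
    PySem.Chars.count s [c] = s.count c := by
  simp [PySem.Chars.count, count_go_single c s s.length 0 le_rfl]

-- [x] is a prefix iff the head is x
theorem prefix_single_head (x : Char) (l : List Char) :
    ([x] <+: l) ↔ l.head? = some x := by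
  cases l with
  | nil => simp
  | cons a t => simp [List.cons_prefix_cons, eq_comm]

-- ".." occurs in s iff pvNoDD s fails
theorem noDD_iff_no_infix (s : List Char) :
    pvNoDD s = true ↔ ¬ (['.', '.'] <:+: s) := by
  induction s with
  | nil => simp [pvNoDD]
  | cons c t ih =>
    rw [pvNoDD_cons, List.infix_cons_iff]
    simp only [Bool.and_eq_true, Bool.not_eq_true', Bool.and_eq_false_iff, ih,
      List.cons_prefix_cons]
    constructor
    · rintro ⟨h1, h2⟩
      rintro (⟨rfl, hp⟩ | hi)
      · rcases h1 with h1 | h1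
        · simp at h1
        · rw [prefix_single_head] at hp
          cases t with
          | nil => simp at hp
          | cons b u => simp_all [pvHeadDot]
      · exact h2 hi
    · intro h
      refine ⟨?_, fun hi => h (Or.inr hi)⟩
      by_cases hc : c = '.'
      · subst hc
        right
        cases t with
        | nil => simp [pvHeadDot]
        | cons b u =>
          by_cases hb : b = '.'
          · exact absurd (Or.inl ⟨rfl, by rw [prefix_single_head]; simp [hb]⟩) h
          · simp [pvHeadDot, hb]
      · left; simp [hc]

-- endswith [x] iff the last element is x
theorem endswith_single_iff (s : List Char) (x : Char) :
    PySem.Chars.endswith s [x] = true ↔ s.getLast? = some x := by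
  rw [show PySem.Chars.endswith s [x] = [x].isSuffixOf s from rfl, List.isSuffixOf_iff_suffix,
    ← List.reverse_prefix]
  simp only [List.reverse_singleton]
  rw [prefix_single_head, List.head?_reverse]

-- the invariant of B's loop
theorem go_spec (cs : List Char) (prevDot : Bool) (dots : Nat) :
    validate_domain_alt_go cs prevDot dots =
      (cs.all (fun c => pvAllowedChars.contains c) && !(prevDot && pvHeadDot cs) &&
        pvNoDD cs && decide (2 ≤ dots + cs.count '.')) := by
  induction cs generalizing prevDot dots with
  | nil => simp [validate_domain_alt_go, pvHeadDot, pvNoDD]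
  | cons c t ih =>
    simp only [validate_domain_alt_go]
    by_cases hok : c ∈ pvAllowedChars
    · have hok' : pvAllowedChars.contains c = true := by simpa using hok
      rw [if_neg (by simpa using hok)]
      by_cases hc : c = '.'
      · subst hc
        rw [if_pos (by simp)]
        cases prevDot with
        | true => simp [pvHeadDot]
        | false =>
          rw [if_neg (by simp)]
          rw [ih, pvNoDD_cons]
          simp only [List.all_cons, hok', pvHeadDot, List.count_cons, BEq.rfl,
            Bool.true_and, Bool.false_and, Bool.not_false]
          cases hhd : pvHeadDot t <;> cases hnd : pvNoDD t <;>
            cases hall : t.all (fun c => pvAllowedChars.contains c) <;>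
              simp_all <;>
                first
                | omega
                | (constructor <;> intro <;> omega)
                | (have he : dots + 1 + List.count '.' t = dots + (List.count '.' t + 1) := by
                     omega
                   rw [he])
      · have hbeq : (c == '.') = false := by simp [hc]
        rw [if_neg (by simp [hbeq]), ih, pvNoDD_cons]
        simp only [List.all_cons, hok', pvHeadDot, List.count_cons, hbeq, Bool.false_and,
          Bool.not_false, Bool.true_and, if_neg hc]
        cases prevDot <;> simp [pvHeadDot, hbeq, hc]
    · rw [if_pos (by simpa using hok)]
      simp [List.all_cons, hok]

set_option maxRecDepth 8192 in
theorem set_ofList_allowed : PySem.Set.ofList pvAllowedChars = pvAllowedChars := by decide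

theorem startswith_head (s : List Char) (x : Char) :
    PySem.Chars.startswith s [x] = true ↔ s.head? = some x := by
  rw [show PySem.Chars.startswith s [x] = [x].isPrefixOf s from rfl, List.isPrefixOf_iff_prefix,
    prefix_single_head]

-- last element of a nonempty list
theorem getLast?_cons_eq (c : Char) (rest : List Char) :
    (c :: rest).getLast? = some (rest.getLastD c) := by
  induction rest generalizing c with
  | nil => rfl
  | cons b u ih => rw [List.getLast?_cons_cons, ih, List.getLastD_cons]

theorem startswith_single_bool (c : Char) (rest : List Char) (x : Char) :
    PySem.Chars.startswith (c :: rest) [x] = (c == x) := by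
  rw [Bool.eq_iff_iff, startswith_head]
  simp

theorem endswith_single_bool (c : Char) (rest : List Char) (x : Char) :
    PySem.Chars.endswith (c :: rest) [x] = (rest.getLastD c == x) := by
  rw [Bool.eq_iff_iff, endswith_single_iff, getLast?_cons_eq]
  simp

theorem isIn_dd_bool (s : List Char) :
    PySem.Chars.isIn ['.', '.'] s = !(pvNoDD s) := by
  have h := noDD_iff_no_infix s
  rw [Bool.eq_iff_iff, PySem.Chars.isIn_iff_infix]
  cases hn : pvNoDD s
  · simp only [hn, Bool.false_eq_true, iff_false] at h
    simp only [Bool.not_false, iff_true]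
    exact not_not.mp h.mpr
  · simp [hn] at h
    simp [h]

-- the two ports agree, stated on the underlying character list
theorem main_list (cs : List Char) :
    ((cs.all fun c => List.contains (PySem.Set.ofList pvAllowedChars) c) &&
          !PySem.Chars.startswith cs ".".toList &&
          !PySem.Chars.endswith cs ".".toList &&
          !PySem.Chars.startswith cs "-".toList &&
          !PySem.Chars.endswith cs "-".toList &&
          !PySem.Chars.isIn "..".toList cs &&
        decide (2 ≤ PySem.Chars.count cs ".".toList)) =
      (match cs with
        | [] => false
        | c :: rest =>
          if (c == '.' || c == '-' || rest.getLastD c == '.' || rest.getLastD c == '-') = true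
          then false
          else validate_domain_alt_go (c :: rest) false 0) := by
  rw [set_ofList_allowed]
  have hdot : (".".toList) = ['.'] := rfl
  have hdash : ("-".toList) = ['-'] := rfl
  have hdd : ("..".toList) = ['.', '.'] := rfl
  rw [hdot, hdash, hdd]
  cases cs with
  | nil => simp [PySem.Chars.count, PySem.Chars.count.go]
  | cons c rest =>
    rw [startswith_single_bool, startswith_single_bool, endswith_single_bool,
      endswith_single_bool, isIn_dd_bool, count_single]
    have hmatch :
        (match c :: rest with
          | [] => false
          | c :: rest =>
            if (c == '.' || c == '-' || rest.getLastD c == '.' || rest.getLastD c == '-') = true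
            then false
            else validate_domain_alt_go (c :: rest) false 0) =
          (if (c == '.' || c == '-' || rest.getLastD c == '.' || rest.getLastD c == '-') = true
           then false
           else validate_domain_alt_go (c :: rest) false 0) := rfl
    rw [hmatch]
    by_cases hguard : (c == '.' || c == '-' || rest.getLastD c == '.' || rest.getLastD c == '-') = true
    · rw [if_pos hguard]
      have hguard' : c = '.' ∨ c = '-' ∨ rest.getLastD c = '.' ∨ rest.getLastD c = '-' := by
        simp only [Bool.or_eq_true, beq_iff_eq] at hguard
        tauto
      rcases hguard' with h | h | h | h <;> rw [h] <;> simp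
    · rw [if_neg hguard, go_spec]
      have h4 : (c == '.') = false ∧ (c == '-') = false ∧
          (rest.getLastD c == '.') = false ∧ (rest.getLastD c == '-') = false := by
        constructor
        · cases h : (c == '.') <;> simp_all
        constructor
        · cases h : (c == '-') <;> simp_all
        constructor
        · cases h : (rest.getLastD c == '.') <;> simp_all
        · cases h : (rest.getLastD c == '-') <;> simp_all
      obtain ⟨h1, h2, h3, hlast4⟩ := h4
      simp only [h1, h2, h3, hlast4, Bool.not_false, Bool.and_true,
        Bool.false_and, Bool.not_not, Nat.zero_add]

-- ===== VERDICT (by name: the statement is the Claim_ definition above) =====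
theorem validate_domain_spec : Claim_equal_validate_domain := by
  intro domain _
  unfold Spec_validate_domain validate_domain validate_domain_alt
  simp only [pysem]
  exact main_list domain.toList
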